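-- pv_equiv track=rewrite | github.com/EvgenyFisenko/algo_and_structures_python | Lesson_2/2.py | rec_count
-- ===== SOURCE A (Python) =====
-- def rec_count(numb, even=0, odd=0):
--     """
--     calculate even & odd numbers count with recursion
--     """
--     if numb == 0:
--         return even, odd
--     else:
--         if (numb % 10) % 2 == 0:
--             even += 1
--         else:
--             odd += 1
--         numb = numb // 10
--         return rec_count(numb, even, odd)
-- ===== SOURCE B (Python) =====
-- def rec_count(numb, even=0, odd=0):
--     """
--     calculate even & odd digit counts iteratively (no recursion)
--     """
--     while numb != 0:
--         if numb % 2 == 0: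
--             even += 1
--         else:
--             odd += 1
--         numb //= 10
--     return even, odd
-- ===== Notes on version B (the rewrite author's own statement) =====
-- stated objective: idiomatic
-- what changed: Replaces the tail recursion with a plain while loop over the same digit recurrence, and tests parity of numb directly (numb % 2) instead of the last digit ((numb % 10) % 2), which is equivalent since 10 is even.
import Mathlib
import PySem

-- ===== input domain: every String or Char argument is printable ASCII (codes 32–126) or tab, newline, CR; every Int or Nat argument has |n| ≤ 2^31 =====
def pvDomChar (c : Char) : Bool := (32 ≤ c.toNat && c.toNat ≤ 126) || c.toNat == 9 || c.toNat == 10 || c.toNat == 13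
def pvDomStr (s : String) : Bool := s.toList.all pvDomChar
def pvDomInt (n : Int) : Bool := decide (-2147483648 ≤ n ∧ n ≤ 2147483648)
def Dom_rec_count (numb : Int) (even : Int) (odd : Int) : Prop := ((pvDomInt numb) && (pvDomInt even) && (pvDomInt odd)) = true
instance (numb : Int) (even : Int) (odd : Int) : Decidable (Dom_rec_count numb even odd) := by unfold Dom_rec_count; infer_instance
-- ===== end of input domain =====

-- B replaces A's tail recursion by a while loop over the same digit recurrence,
-- testing parity of numb directly (numb % 2) instead of ((numb % 10) % 2).


-- ===== PORT A =====
-- literal port of A's recursion; the 'numb < 0' guard only cuts the branch on which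
-- the Python diverges (RecursionError), excluded by Pre_rec_count
def rec_count (numb : Int) (even : Int) (odd : Int) : Int × Int :=
  if numb = 0 then (even, odd)
  else
    let even' := if PySem.Int.mod (PySem.Int.mod numb 10) 2 = 0 then even + 1 else even
    let odd'  := if PySem.Int.mod (PySem.Int.mod numb 10) 2 = 0 then odd else odd + 1
    if numb < 0 then (even', odd')
    else rec_count (PySem.Int.floordiv numb 10) even' odd'
termination_by numb.toNat
decreasing_by
  rename_i h0 hneg
  have h10 : PySem.Int.floordiv numb 10 = numb / 10 := PySem.Int.floordiv_eq_ediv_of_pos (by omega)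
  rw [h10]; omega

-- ===== PORT B =====
-- the while loop of Source B; same guard remark for negative numb (Python loops forever there)
def recCountLoop (numb : Int) (even : Int) (odd : Int) : Int × Int :=
  if numb = 0 ∨ numb < 0 then (even, odd)
  else
    recCountLoop (PySem.Int.floordiv numb 10)
      (if PySem.Int.mod numb 2 = 0 then even + 1 else even)
      (if PySem.Int.mod numb 2 = 0 then odd else odd + 1)
termination_by numb.toNat
decreasing_by
  rename_i h
  have h10 : PySem.Int.floordiv numb 10 = numb / 10 := PySem.Int.floordiv_eq_ediv_of_pos (by omega)
  rw [h10]; omega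

def rec_count_alt (numb : Int) (even : Int) (odd : Int) : Int × Int :=
  recCountLoop numb even odd

-- ===== PRECONDITION & SPEC =====
-- Pre_ excludes negative numb: there the Python A never returns (infinite recursion,
-- RecursionError) and the Python B loops forever.
def Pre_rec_count (numb : Int) (even : Int) (odd : Int) : Prop := 0 ≤ numb
instance (numb : Int) (even : Int) (odd : Int) : Decidable (Pre_rec_count numb even odd) := by unfold Pre_rec_count; infer_instance
def pvWitness_rec_count : Int × Int × Int := (1234, 0, 0)

def Spec_rec_count (numb : Int) (even : Int) (odd : Int) (out : Int × Int) : Prop := out = rec_count_alt numb even odd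
instance (numb : Int) (even : Int) (odd : Int) (out : Int × Int) : Decidable (Spec_rec_count numb even odd out) := by unfold Spec_rec_count; infer_instance

-- ===== CLAIM =====
def Claim_equal_rec_count : Prop := ∀ (numb : Int) (even : Int) (odd : Int), Dom_rec_count numb even odd → Pre_rec_count numb even odd → Spec_rec_count numb even odd (rec_count numb even odd)

-- ===== LEMMAS AND PROOFS =====

-- parity of the last digit equals parity of the number (10 is even)
theorem pv_mod10_mod2 (n : Int) : PySem.Int.mod (PySem.Int.mod n 10) 2 = PySem.Int.mod n 2 := by
  have h1 := PySem.Int.mod_eq_emod_of_pos (a := PySem.Int.mod n 10) (b := 2) (by norm_num)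
  have h2 := PySem.Int.mod_eq_emod_of_pos (a := n) (b := 2) (by norm_num)
  have h3 := PySem.Int.mod_eq_emod_of_pos (a := n) (b := 10) (by norm_num)
  rw [h1, h2, h3]
  omega

theorem pv_rec_eq_loop (k : Nat) : ∀ (numb even odd : Int), 0 ≤ numb → numb.toNat ≤ k →
    rec_count numb even odd = recCountLoop numb even odd := by
  induction k with
  | zero =>
    intro numb even odd hpos hk
    have : numb = 0 := by omega
    subst this
    rw [rec_count, recCountLoop]; simp
  | succ k ih =>
    intro numb even odd hpos hk
    rw [rec_count, recCountLoop]
    by_cases h0 : numb = 0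
    · simp [h0]
    · have hlt : ¬ numb < 0 := by omega
      simp only [h0, hlt, if_false, or_false, pv_mod10_mod2]
      have h10 : PySem.Int.floordiv numb 10 = numb / 10 := PySem.Int.floordiv_eq_ediv_of_pos (by norm_num)
      exact ih _ _ _ (by rw [h10]; omega) (by rw [h10]; omega)

-- ===== VERDICT =====
theorem rec_count_spec : Claim_equal_rec_count := by
  intro numb even odd _ hpre
  unfold Spec_rec_count rec_count_alt
  exact pv_rec_eq_loop numb.toNat numb even odd hpre (le_refl _)
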